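-- pv_equiv track=rewrite | github.com/lzbhaha123/SubnetCalculator | SubnetCalculator/sc_support.py | bin_plus_one
-- ===== SOURCE A (Python) =====
-- def bin_plus_one(str_bin):
--     bigger_bin = ''
--     for i in range(len(str_bin)):
--         if i == len(str_bin)-1:
--             bigger_bin += '1'
--         else:
--             bigger_bin += str_bin[i-1]
--     return  bigger_bin
-- ===== SOURCE B (Python) =====
-- def bin_plus_one(str_bin):
--     # closed form: A right-rotates the string and overwrites the last char with '1'
--     if not str_bin:
--         return ''
--     return (str_bin[-1] + str_bin)[:-2] + '1'
-- ===== Notes on version B (the rewrite author's own statement) =====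
-- stated objective: simpler
-- what changed: Replaced the char-by-char accumulation loop with a closed-form slicing expression: the result is the right-rotation of the string with the last character replaced by the digit one.
import Mathlib
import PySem

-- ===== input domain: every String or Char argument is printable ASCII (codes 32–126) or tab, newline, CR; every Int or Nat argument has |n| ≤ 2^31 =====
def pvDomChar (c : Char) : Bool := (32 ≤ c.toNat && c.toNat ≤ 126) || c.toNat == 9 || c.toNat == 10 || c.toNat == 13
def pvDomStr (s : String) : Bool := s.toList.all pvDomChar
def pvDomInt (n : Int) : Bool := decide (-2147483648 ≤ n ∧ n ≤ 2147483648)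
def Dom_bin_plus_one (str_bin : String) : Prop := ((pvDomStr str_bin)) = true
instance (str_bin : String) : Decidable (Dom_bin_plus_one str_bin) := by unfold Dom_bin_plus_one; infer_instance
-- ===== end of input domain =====

-- B replaces A's char-by-char accumulation loop with a closed-form slice: the
-- right-rotation of the string with its last character overwritten by '1' (objective: simpler).


-- ===== PORT A =====
def bin_plus_one (str_bin : String) : String :=
  let l := str_bin.toList
  let n : Int := l.length
  String.ofList ((PySem.List.pyRange 0 n 1).foldl (fun acc i =>
    if i = n - 1 then acc ++ ['1']
    else
      match PySem.List.pyGet? l (i - 1) with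
      | some c => acc ++ [c]
      | none => acc) [])

-- ===== PORT B =====
def bin_plus_one_alt (str_bin : String) : String :=
  let l := str_bin.toList
  if h : l = [] then ""
  else String.ofList (PySem.List.slice (l.getLast h :: l) none (some (-2)) ++ ['1'])

-- ===== PRECONDITION & SPEC =====
def Spec_bin_plus_one (str_bin : String) (out : String) : Prop := out = bin_plus_one_alt str_bin
instance (str_bin : String) (out : String) : Decidable (Spec_bin_plus_one str_bin out) := by unfold Spec_bin_plus_one; infer_instance

-- ===== CLAIM (what is proved, stated in full; the proofs are below) =====
def Claim_equal_bin_plus_one : Prop := ∀ (str_bin : String), Dom_bin_plus_one str_bin → Spec_bin_plus_one str_bin (bin_plus_one str_bin)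

-- ===== LEMMAS AND PROOFS =====

-- ===== VERDICT (by name: the statement is the Claim_ definition above) =====
-- A's fold over range(0,m) (m below the last index) builds the first m chars of last::l.
theorem bpo_prefix (l : List Char) (h : l ≠ []) (m : Nat) (hm : m ≤ l.length - 1) :
    (PySem.List.pyRange 0 (m : Int) 1).foldl (fun acc i =>
      if i = (l.length : Int) - 1 then acc ++ ['1']
      else
        match PySem.List.pyGet? l (i - 1) with
        | some c => acc ++ [c]
        | none => acc) [] = (l.getLast h :: l).take m := by
  have hlen : 1 ≤ l.length := List.length_pos_iff.mpr h
  induction m with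
  | zero => simp [PySem.List.pyRange_one (a := 0) (b := 0)]
  | succ m ih =>
    have hm' : m ≤ l.length - 1 := Nat.le_of_succ_le hm
    have hsplit : PySem.List.pyRange 0 ((m + 1 : Nat) : Int) 1 =
        PySem.List.pyRange 0 (m : Int) 1 ++ [(m : Int)] := by
      have := PySem.List.pyRange_one_succ_right (a := 0) (b := (m : Int)) (by positivity)
      push_cast
      exact this
    rw [hsplit, List.foldl_append, ih hm']
    have hne : (m : Int) ≠ (l.length : Int) - 1 := by omega
    simp only [List.foldl_cons, List.foldl_nil, hne, if_false]
    have hget : PySem.List.pyGet? l ((m : Int) - 1) = some ((l.getLast h :: l)[m]'(by simp; omega)) := by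
      cases m with
      | zero =>
        simp [PySem.List.pyGet?_neg_one, List.getLast?_eq_some_getLast (l := l) h]
      | succ k =>
        have hk : k < l.length := by omega
        have : ((k + 1 : Nat) : Int) - 1 = (k : Int) := by push_cast; ring
        rw [this, PySem.List.pyGet?_natCast, List.getElem?_eq_getElem hk]
        simp
    rw [hget]
    rw [List.take_add_one, List.getElem?_eq_getElem (by simp; omega)]
    simp

theorem bin_plus_one_spec : Claim_equal_bin_plus_one := by
  intro str_bin _
  unfold Spec_bin_plus_one bin_plus_one bin_plus_one_alt
  by_cases h : str_bin.toList = []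
  · simp only [h, List.length_nil, Nat.cast_zero, PySem.List.pyRange_one, dite_true]
    rfl
  · simp only [h, dite_false]
    set l := str_bin.toList with hl
    have hlen : 1 ≤ l.length := List.length_pos_iff.mpr h
    have hsplit : PySem.List.pyRange 0 (l.length : Int) 1 =
        PySem.List.pyRange 0 ((l.length - 1 : Nat) : Int) 1 ++ [((l.length - 1 : Nat) : Int)] := by
      have := PySem.List.pyRange_one_succ_right (a := 0) (b := ((l.length - 1 : Nat) : Int))
        (by positivity)
      rw [← this]
      congr 1
      omega
    rw [hsplit, List.foldl_append, bpo_prefix l h (l.length - 1) le_rfl]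
    have hif : ((l.length - 1 : Nat) : Int) = (l.length : Int) - 1 := by omega
    simp only [hif, List.foldl_cons, List.foldl_nil, ← hl, if_true]
    rw [PySem.List.slice_to_neg_ofNat _ 2 (by omega)]
    have hlen2 : (l.getLast h :: l).length - 2 = l.length - 1 := by simp
    rw [hlen2]
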